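-- pv_equiv track=rewrite | github.com/Sarthak001G/Tit-program | P_33.py | replace_repeating_characters
-- ===== SOURCE A (Python) =====
-- def replace_repeating_characters(s):
--     seen = set()
--     result = []
--
--     for c in s:
--         if c != ' ' and c in seen:
--             result.append('-')
--         else:
--             result.append(c)
--             seen.add(c)
--
--     return ''.join(result)
-- ===== SOURCE B (Python) =====
-- def replace_repeating_characters(s):
--     first = {}
--     for i, c in enumerate(s):
--         if c not in first:
--             first[c] = i
--     return ''.join(c if c == ' ' or first.get(c) == i else '-' for i, c in enumerate(s))
-- ===== Notes on version B (the rewrite author's own statement) =====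
-- stated objective: alternative
-- what changed: Replaces A's single pass with a mutable seen-set by two passes: one builds a first-occurrence-index dict, the second emits each character verbatim iff it is a space or sits at its recorded first index.
import Mathlib
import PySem

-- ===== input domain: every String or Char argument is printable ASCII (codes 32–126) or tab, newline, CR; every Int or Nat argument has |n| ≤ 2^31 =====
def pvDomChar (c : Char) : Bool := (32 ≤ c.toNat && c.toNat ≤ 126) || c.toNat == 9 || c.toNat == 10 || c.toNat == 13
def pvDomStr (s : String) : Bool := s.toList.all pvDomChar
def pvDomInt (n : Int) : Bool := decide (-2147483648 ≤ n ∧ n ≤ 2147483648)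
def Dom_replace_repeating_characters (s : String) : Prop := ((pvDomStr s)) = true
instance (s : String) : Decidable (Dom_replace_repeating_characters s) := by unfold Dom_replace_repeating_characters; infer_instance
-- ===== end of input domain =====

-- B replaces A's single pass with a mutable seen-set by two passes: a precomputed first-occurrence index table consulted per position (alternative decomposition, same cost).

-- ===== PORT A =====
def replace_repeating_characters (s : String) : String :=
  let st := s.toList.foldl
    (fun (st : PySem.Set Char × List Char) c =>
      if c != ' ' && PySem.Set.contains st.1 c then (st.1, st.2 ++ ['-'])
      else (PySem.Set.add st.1 c, st.2 ++ [c]))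
    (PySem.Set.empty, [])
  String.ofList st.2

-- ===== PORT B =====
def replace_repeating_characters_alt (s : String) : String :=
  let cs := s.toList
  let first := (PySem.List.enumerate cs 0).foldl
    (fun (d : PySem.Dict Char Int) p => if !(d.contains p.2) then d.insert p.2 p.1 else d)
    PySem.Dict.empty
  String.ofList ((PySem.List.enumerate cs 0).map
    (fun p => if p.2 == ' ' || (first.get? p.2 == some p.1) then p.2 else '-'))

-- ===== PRECONDITION & SPEC =====
def Spec_replace_repeating_characters (s : String) (out : String) : Prop := out = replace_repeating_characters_alt s
instance (s : String) (out : String) : Decidable (Spec_replace_repeating_characters s out) := by unfold Spec_replace_repeating_characters; infer_instance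

-- ===== CLAIM (what is proved, stated in full; the proofs are below) =====
def Claim_equal_replace_repeating_characters : Prop := ∀ (s : String), Dom_replace_repeating_characters s → Spec_replace_repeating_characters s (replace_repeating_characters s)

-- ===== LEMMAS AND PROOFS =====

-- reference: emit c iff it is a space or not yet seen in the processed prefix `pre`
def pvRef : List Char → List Char → List Char
  | [], _ => []
  | c :: t, pre => (if c = ' ' ∨ c ∉ pre then c else '-') :: pvRef t (pre ++ [c])

theorem pvA_loop (cs : List Char) : ∀ (pre acc : List Char),
    (cs.foldl
      (fun (st : PySem.Set Char × List Char) c =>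
        if c != ' ' && PySem.Set.contains st.1 c then (st.1, st.2 ++ ['-'])
        else (PySem.Set.add st.1 c, st.2 ++ [c]))
      (List.foldl PySem.Set.add [] pre, acc)).2 = acc ++ pvRef cs pre := by
  induction cs with
  | nil => intro pre acc; simp [pvRef]
  | cons c t ih =>
    intro pre acc
    rw [List.foldl_cons]
    by_cases hm : c ≠ ' ' ∧ c ∈ pre
    · have hc : (List.foldl PySem.Set.add [] pre).contains c = true := by
        rw [← PySem.Set.ofList_eq_foldl, PySem.Set.contains_iff, PySem.Set.mem_ofList]
        exact hm.2
      have hcond : (c != ' ' && (List.foldl PySem.Set.add [] pre).contains c) = true := by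
        simp only [Bool.and_eq_true, bne_iff_ne]
        exact ⟨hm.1, hc⟩
      rw [if_pos hcond]
      have hmem : c ∈ List.foldl PySem.Set.add [] pre := by
        rw [← PySem.Set.ofList_eq_foldl, PySem.Set.mem_ofList]
        exact hm.2
      have hset : List.foldl PySem.Set.add [] (pre ++ [c]) = List.foldl PySem.Set.add [] pre := by
        rw [List.foldl_append, List.foldl_cons, List.foldl_nil]
        simp [PySem.Set.add, hmem]
      rw [← hset, ih]
      have hcnd : ¬(c = ' ' ∨ c ∉ pre) := by
        intro h
        rcases h with h | h
        · exact hm.1 h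
        · exact h hm.2
      have hrefc : pvRef (c :: t) pre = '-' :: pvRef t (pre ++ [c]) := by
        simp only [pvRef, if_neg hcnd]
      rw [hrefc]; simp
    · have hcond : ¬((c != ' ' && (List.foldl PySem.Set.add [] pre).contains c) = true) := by
        intro hcontra
        rw [Bool.and_eq_true, bne_iff_ne] at hcontra
        exact hm ⟨hcontra.1, (PySem.Set.mem_ofList _ _).mp ((PySem.Set.contains_iff _ _).mp hcontra.2)⟩
      rw [if_neg hcond]
      have hset : List.foldl PySem.Set.add [] (pre ++ [c]) = (List.foldl PySem.Set.add [] pre).add c := by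
        rw [List.foldl_append, List.foldl_cons, List.foldl_nil]
      rw [← hset, ih]
      have hor : c = ' ' ∨ c ∉ pre := by
        by_cases hs : c = ' '
        · exact Or.inl hs
        · exact Or.inr (fun hp => hm ⟨hs, hp⟩)
      have hrefc : pvRef (c :: t) pre = c :: pvRef t (pre ++ [c]) := by
        simp only [pvRef, if_pos hor]
      rw [hrefc]; simp

-- the dict built by B's first pass: closed form of its lookups
theorem pvDict_loop (cs : List Char) (c : Char) : ∀ (d : PySem.Dict Char Int) (s : Int),
    ((PySem.List.enumerate cs s).foldl
      (fun (d : PySem.Dict Char Int) p => if !(d.contains p.2) then d.insert p.2 p.1 else d) d).get? c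
    = if d.contains c then d.get? c
      else (cs.idxOf? c).map (fun k : Nat => s + (k : Int)) := by
  induction cs with
  | nil =>
    intro d s
    simp only [PySem.List.enumerate_nil, List.foldl_nil, List.idxOf?_nil, Option.map_none]
    by_cases hdc : d.contains c = true
    · rw [if_pos hdc]
    · rw [if_neg hdc]
      exact (PySem.Dict.get?_eq_none_iff_contains d c).mpr (by simpa using hdc)
  | cons x t ih =>
    intro d s
    rw [PySem.List.enumerate_cons, List.foldl_cons]
    by_cases hdx : d.contains x = true
    · rw [if_neg (by simp [hdx]), ih]
      by_cases hcx : c = x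
      · subst hcx; rw [if_pos hdx, if_pos hdx]
      · by_cases hdc : d.contains c = true
        · rw [if_pos hdc, if_pos hdc]
        · rw [if_neg hdc, if_neg hdc,
            List.idxOf?_cons, if_neg (by simp only [beq_iff_eq]; exact fun h => hcx h.symm),
            Option.map_map]
          congr 1; funext k; simp only [Function.comp_apply]; push_cast; ring
    · have hdx' : d.contains x = false := by simpa using hdx
      rw [if_pos (by simp [hdx']), ih]
      by_cases hcx : c = x
      · subst hcx
        rw [if_pos (by simp [PySem.Dict.contains_insert_self]), PySem.Dict.get?_insert_self,
          if_neg (by simp [hdx']), List.idxOf?_cons, if_pos (by simp)]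
        simp
      · have hci : (d.insert x s).contains c = d.contains c := by
          rw [PySem.Dict.contains_insert]; simp [hcx]
        rw [hci, PySem.Dict.get?_insert_of_ne d s hcx]
        by_cases hdc : d.contains c = true
        · rw [if_pos hdc, if_pos hdc]
        · rw [if_neg hdc, if_neg hdc,
            List.idxOf?_cons, if_neg (by simp only [beq_iff_eq]; exact fun h => hcx h.symm),
            Option.map_map]
          congr 1; funext k; simp only [Function.comp_apply]; push_cast; ring

theorem pvIdxOf?_append_first (pre t : List Char) (c : Char) (hm : c ∉ pre) :
    (pre ++ c :: t).idxOf? c = some pre.length := by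
  induction pre with
  | nil => simp [List.idxOf?_cons]
  | cons x p ih =>
    simp only [List.mem_cons, not_or] at hm
    rw [List.cons_append, List.idxOf?_cons,
      if_neg (by simp only [beq_iff_eq]; exact fun h => hm.1 h.symm), ih hm.2]
    simp

theorem pvIdxOf?_append_seen (pre t : List Char) (c : Char) (hm : c ∈ pre) :
    ∃ k, (pre ++ t).idxOf? c = some k ∧ k < pre.length := by
  induction pre with
  | nil => simp at hm
  | cons x p ih =>
    by_cases hxc : x = c
    · exact ⟨0, by simp [List.cons_append, List.idxOf?_cons, hxc], Nat.succ_pos _⟩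
    · have hcp : c ∈ p := by
        rcases List.mem_cons.mp hm with h | h
        · exact absurd h.symm hxc
        · exact h
      obtain ⟨k, hk, hlt⟩ := ih hcp
      refine ⟨k + 1, ?_, by simp [List.length_cons]; omega⟩
      rw [List.cons_append, List.idxOf?_cons, if_neg (by simp [hxc]), hk]
      rfl

-- B's second pass equals the reference, for the dict built over the whole string
theorem pvB_loop (cs : List Char) : ∀ (pre t : List Char), cs = pre ++ t →
    (PySem.List.enumerate t (pre.length : Int)).map
      (fun p => if p.2 == ' ' || ((((PySem.List.enumerate cs 0).foldl
          (fun (d : PySem.Dict Char Int) p => if !(d.contains p.2) then d.insert p.2 p.1 else d)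
          PySem.Dict.empty).get? p.2) == some p.1) then p.2 else '-')
    = pvRef t pre := by
  intro pre t
  induction t generalizing pre with
  | nil => intro _; simp [PySem.List.enumerate_nil, pvRef]
  | cons c t ih =>
    intro hcs
    subst hcs
    have hget : (((PySem.List.enumerate (pre ++ c :: t) 0).foldl
        (fun (d : PySem.Dict Char Int) p => if !(d.contains p.2) then d.insert p.2 p.1 else d)
        PySem.Dict.empty).get? c) = ((pre ++ c :: t).idxOf? c).map (fun k : Nat => (k : Int)) := by
      rw [pvDict_loop, if_neg (by simp [PySem.Dict.contains_empty])]
      cases h : (pre ++ c :: t).idxOf? c <;> simp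
    have htail := ih (pre ++ [c]) (by simp)
    rw [show (((pre ++ [c]).length : Nat) : Int) = (pre.length : Int) + 1 from by simp] at htail
    rw [PySem.List.enumerate_cons, List.map_cons, htail]
    simp only [pvRef]
    congr 1
    by_cases hsp : c = ' '
    · subst hsp; simp
    · by_cases hm : c ∈ pre
      · obtain ⟨k, hk, hlt⟩ := pvIdxOf?_append_seen pre (c :: t) c hm
        rw [hget, hk]
        have hne : ¬(((k : Nat) : Int) = ((pre.length : Nat) : Int)) := by
          intro h; omega
        simp [hsp, hm, hne]
      · rw [hget, pvIdxOf?_append_first pre t c hm]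
        simp [hsp, hm]

-- ===== VERDICT (by name: the statement is the Claim_ definition above) =====
theorem replace_repeating_characters_spec : Claim_equal_replace_repeating_characters := by
  intro s _
  have hA : (s.toList.foldl
      (fun (st : PySem.Set Char × List Char) c =>
        if c != ' ' && PySem.Set.contains st.1 c then (st.1, st.2 ++ ['-'])
        else (PySem.Set.add st.1 c, st.2 ++ [c]))
      (PySem.Set.empty, ([] : List Char))).2 = [] ++ pvRef s.toList [] :=
    pvA_loop s.toList [] []
  have hB := pvB_loop s.toList [] s.toList rfl
  simp only [List.length_nil, Nat.cast_zero] at hB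
  simp only [Spec_replace_repeating_characters, replace_repeating_characters,
    replace_repeating_characters_alt]
  rw [hA, hB]
  simp
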